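-- pv_equiv track=rewrite | github.com/uv-xiao/IntelliC | .agents/skills/record-human-instructions/scripts/record_human_instruction.py | split_entries
-- ===== SOURCE A (Python) =====
-- def split_entries(timeline_body: str) -> list[str]:
--     entries: list[str] = []
--     current: list[str] = []
--     for line in timeline_body.strip().splitlines():
--         if line.startswith("- ") and current:
--             entries.append("\n".join(current).rstrip())
--             current = [line]
--         elif line.startswith("- "):
--             current = [line]
--         elif current:
--             current.append(line)
--     if current:
--         entries.append("\n".join(current).rstrip())
--     return entries
-- ===== SOURCE B (Python) =====
-- def split_entries(timeline_body: str) -> list[str]: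
--     lines = timeline_body.strip().splitlines()
--     # drop any preamble before the first "- " marker
--     while lines and not lines[0].startswith("- "):
--         lines = lines[1:]
--     out: list[str] = []
--     # chunk by locating the next marker, then slicing the block off the front
--     while lines:
--         n = 1
--         while n < len(lines) and not lines[n].startswith("- "):
--             n += 1
--         out.append("\n".join(lines[:n]).rstrip())
--         lines = lines[n:]
--     return out
-- ===== Notes on version B (the rewrite author's own statement) =====
-- stated objective: alternative
-- what changed: Replaces A's single stateful accumulator loop (entries/current lists with flush-on-marker branching) by a two-level decomposition: drop the preamble before the first '- ' marker, then repeatedly locate the next marker and slice one whole block off the front.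
import Mathlib
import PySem

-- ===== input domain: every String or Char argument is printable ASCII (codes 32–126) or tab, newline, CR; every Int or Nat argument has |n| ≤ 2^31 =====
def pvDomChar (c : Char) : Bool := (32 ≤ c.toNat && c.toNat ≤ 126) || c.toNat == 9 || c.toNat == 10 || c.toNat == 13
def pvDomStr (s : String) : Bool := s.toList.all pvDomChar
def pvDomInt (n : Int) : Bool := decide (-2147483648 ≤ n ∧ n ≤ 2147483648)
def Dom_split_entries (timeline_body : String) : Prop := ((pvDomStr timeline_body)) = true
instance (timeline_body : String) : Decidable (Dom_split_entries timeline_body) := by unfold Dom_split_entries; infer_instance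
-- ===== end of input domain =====

-- B replaces A's stateful accumulator loop by locate-next-marker-then-slice chunking (alternative decomposition, same cost).

-- ===== PORT A =====
-- one iteration of A's for-loop; state = (entries, current)
def pvStepA (st : List String × List String) (line : String) : List String × List String :=
  if PySem.Str.startswith line "- " && !st.2.isEmpty then
    (st.1 ++ [PySem.Str.rstrip (PySem.Str.join "\n" st.2)], [line])
  else if PySem.Str.startswith line "- " then
    (st.1, [line])
  else if !st.2.isEmpty then
    (st.1, st.2 ++ [line])
  else st

def split_entries (timeline_body : String) : List String :=
  let st := (PySem.Str.splitlines (PySem.Str.strip timeline_body)).foldl pvStepA ([], [])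
  if !st.2.isEmpty then st.1 ++ [PySem.Str.rstrip (PySem.Str.join "\n" st.2)] else st.1

-- ===== PORT B =====
-- the inner `while n < len(lines) and not lines[n].startswith("- ")` counter, as recursion over lines[1:]
def pvBLen : List String → Nat
  | [] => 0
  | x :: xs => if PySem.Str.startswith x "- " then 0 else pvBLen xs + 1

-- the outer `while lines:` loop; lines[:n] / lines[n:] with 0 ≤ n ≤ len are exactly take/drop (PySem.List.slice_to_natCast / slice_from_natCast)
def pvGo (out : List String) : List String → List String
  | [] => out
  | l :: ls =>
    pvGo (out ++ [PySem.Str.rstrip (PySem.Str.join "\n" ((l :: ls).take (pvBLen ls + 1)))])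
         ((l :: ls).drop (pvBLen ls + 1))
termination_by ls => ls.length
decreasing_by simp [List.length_drop]

-- the preamble `while lines and not lines[0].startswith("- "): lines = lines[1:]`
def pvDropPre : List String → List String
  | [] => []
  | l :: ls => if PySem.Str.startswith l "- " then l :: ls else pvDropPre ls

def split_entries_alt (timeline_body : String) : List String :=
  pvGo [] (pvDropPre (PySem.Str.splitlines (PySem.Str.strip timeline_body)))

-- ===== PRECONDITION & SPEC =====
def Spec_split_entries (timeline_body : String) (out : List String) : Prop := out = split_entries_alt timeline_body
instance (timeline_body : String) (out : List String) : Decidable (Spec_split_entries timeline_body out) := by unfold Spec_split_entries; infer_instance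

-- ===== CLAIM (what is proved, stated in full; the proofs are below) =====
def Claim_equal_split_entries : Prop := ∀ (timeline_body : String), Dom_split_entries timeline_body → Spec_split_entries timeline_body (split_entries timeline_body)

-- ===== LEMMAS AND PROOFS =====
-- A's end-of-loop flush
def pvFinishA (st : List String × List String) : List String :=
  if !st.2.isEmpty then st.1 ++ [PySem.Str.rstrip (PySem.Str.join "\n" st.2)] else st.1

theorem pvGo_nil (out : List String) : pvGo out [] = out := by unfold pvGo; rfl

theorem pvGo_cons (out : List String) (l : String) (ls : List String) :
    pvGo out (l :: ls) =
      pvGo (out ++ [PySem.Str.rstrip (PySem.Str.join "\n" ((l :: ls).take (pvBLen ls + 1)))])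
           ((l :: ls).drop (pvBLen ls + 1)) := by
  rw [pvGo.eq_def]

theorem pvBLen_take (ls : List String) :
    ls.take (pvBLen ls) = ls.takeWhile (fun x => !PySem.Str.startswith x "- ") := by
  induction ls with
  | nil => rfl
  | cons x xs ih =>
    by_cases hx : PySem.Chars.startswith x.toList ['-', ' '] = true <;>
      simp [pvBLen, hx, ih]

theorem pvBLen_drop (ls : List String) :
    ls.drop (pvBLen ls) = ls.dropWhile (fun x => !PySem.Str.startswith x "- ") := by
  induction ls with
  | nil => rfl
  | cons x xs ih =>
    by_cases hx : PySem.Chars.startswith x.toList ['-', ' '] = true <;>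
      simp [pvBLen, hx, ih]

theorem pvFold_nonempty (ls : List String) :
    ∀ (acc cur : List String), cur ≠ [] →
    pvFinishA (ls.foldl pvStepA (acc, cur)) =
      pvGo (acc ++ [PySem.Str.rstrip (PySem.Str.join "\n"
              (cur ++ ls.takeWhile (fun x => !PySem.Str.startswith x "- ")))])
           (ls.dropWhile (fun x => !PySem.Str.startswith x "- ")) := by
  induction ls with
  | nil =>
    intro acc cur h
    simp [pvFinishA, pvGo_nil, h]
  | cons x xs ih =>
    intro acc cur h
    by_cases hx : PySem.Chars.startswith x.toList ['-', ' '] = true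
    · have hstep : pvStepA (acc, cur) x =
          (acc ++ [PySem.Str.rstrip (PySem.Str.join "\n" cur)], [x]) := by
        simp [pvStepA, hx, h]
      rw [List.foldl_cons, hstep, ih _ [x] (by simp)]
      simp [hx, pvGo_cons,
            pvBLen_take, pvBLen_drop, List.append_assoc]
    · have hstep : pvStepA (acc, cur) x = (acc, cur ++ [x]) := by
        simp [pvStepA, hx, h]
      rw [List.foldl_cons, hstep, ih _ (cur ++ [x]) (by simp)]
      simp [hx, List.append_assoc]

theorem pvFold_main (ls : List String) :
    pvFinishA (ls.foldl pvStepA ([], [])) = pvGo [] (pvDropPre ls) := by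
  induction ls with
  | nil => simp [pvFinishA, pvDropPre, pvGo_nil]
  | cons x xs ih =>
    by_cases hx : PySem.Chars.startswith x.toList ['-', ' '] = true
    · have hstep : pvStepA (([] : List String), ([] : List String)) x = ([], [x]) := by
        simp [pvStepA, hx]
      rw [List.foldl_cons, hstep, pvFold_nonempty xs [] [x] (by simp)]
      simp [pvDropPre, hx, pvGo_cons, pvBLen_take, pvBLen_drop]
    · have hstep : pvStepA (([] : List String), ([] : List String)) x = ([], []) := by
        simp [pvStepA, hx]
      rw [List.foldl_cons, hstep, ih]
      simp [pvDropPre, hx]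

-- ===== VERDICT (by name: the statement is the Claim_ definition above) =====
theorem split_entries_spec : Claim_equal_split_entries := by
  intro s _
  show split_entries s = split_entries_alt s
  unfold split_entries split_entries_alt
  exact pvFold_main (PySem.Str.splitlines (PySem.Str.strip s))
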